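-- pv_equiv track=rewrite | github.com/s4hlo/the-farmer-was-replaced | utils_list.py | deserialize_2d_matrix_unsafe_RR
-- ===== SOURCE A (Python) =====
-- def enumerate_list(ls):
-- 	# Returns a list of (idx, val) pairs
-- 	i = 0
-- 	result = []
-- 	for item in ls:
-- 		result.append((i, item))
-- 		i = i + 1
-- 	return result
--
-- def deserialize_2d_matrix_unsafe_RR(m, dim_len):
-- 	# Rebuilds a 2D matrix from a 1D list,
-- 	# distributing items as evenly as possible.
-- 	# Uses the Round Robin strategy.
-- 	#
-- 	# Args:
-- 	#     m: list
-- 	#     dim_len: int 0th dim target length (number of rows)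
-- 	# Returns:
-- 	#     list[list]: 2D "best-effort" matrix distributed RR
--
-- 	if dim_len <= 0:
-- 		return [m]
--
-- 	n = len(m)
-- 	# NOTE update when list comps [[] for _ in range(dim_len)]
-- 	res = []
-- 	for _ in range(dim_len):
-- 		res.append([])
-- 	if n == 0:
-- 		return res
--
-- 	# round robin placement
-- 	for idx, item in enumerate_list(m):
-- 		res[idx % dim_len].append(item)
--
-- 	return res
-- ===== SOURCE B (Python) =====
-- def deserialize_2d_matrix_unsafe_RR(m, dim_len):
-- 	# Chunk-recursive round robin: the first dim_len items are the heads of the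
-- 	# rows, then recurse on the remainder of the list.
-- 	if dim_len <= 0:
-- 		return [m]
-- 	if not m:
-- 		return [[] for _ in range(dim_len)]
-- 	rest = deserialize_2d_matrix_unsafe_RR(m[dim_len:], dim_len)
-- 	return [m[r:r + 1] + rest[r] for r in range(dim_len)]
-- ===== Notes on version B (the rewrite author's own statement) =====
-- stated objective: alternative
-- what changed: Replaces the per-item loop that dispatches each element to row idx % dim_len (via an enumerate helper) with a chunk-wise recursion: the first dim_len items become the heads of the rows and the function recurses on the remaining slice, concatenating per-row; the enumerate_list helper and the explicit n==0 pre-allocation loop disappear.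
import Mathlib
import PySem

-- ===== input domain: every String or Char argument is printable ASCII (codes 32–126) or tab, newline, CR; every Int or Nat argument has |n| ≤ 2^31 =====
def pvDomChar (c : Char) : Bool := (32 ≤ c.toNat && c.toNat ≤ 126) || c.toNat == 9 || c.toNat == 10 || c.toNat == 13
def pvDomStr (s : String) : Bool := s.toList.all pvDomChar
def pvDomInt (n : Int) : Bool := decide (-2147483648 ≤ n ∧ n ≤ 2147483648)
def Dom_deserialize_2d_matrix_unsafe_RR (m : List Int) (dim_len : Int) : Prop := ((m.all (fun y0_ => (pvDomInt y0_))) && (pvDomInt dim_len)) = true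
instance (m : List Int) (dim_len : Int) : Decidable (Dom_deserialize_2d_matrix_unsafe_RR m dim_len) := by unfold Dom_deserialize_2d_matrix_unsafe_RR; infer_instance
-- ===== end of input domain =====

-- B rebuilds the rows chunk-recursively (first dim_len items are the row heads, recurse on
-- the rest) instead of A's per-item dispatch to row idx % dim_len; objective: alternative.

-- ===== PORT A =====
def enumerate_list (ls : List Int) : List (Int × Int) :=
  (ls.foldl (fun (st : Int × List (Int × Int)) item => (st.1 + 1, st.2 ++ [(st.1, item)])) (0, [])).2

def deserialize_2d_matrix_unsafe_RR (m : List Int) (dim_len : Int) : List (List Int) :=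
  if dim_len ≤ 0 then [m]
  else
    let n : Int := m.length
    let res : List (List Int) := (PySem.List.pyRange 0 dim_len 1).foldl (fun acc _ => acc ++ [[]]) []
    if n = 0 then res
    else
      -- res[idx % dim_len].append(item): in-place row append = modify at that index
      (enumerate_list m).foldl
        (fun res p => res.modify (PySem.Int.mod p.1 dim_len).toNat (fun row => row ++ [p.2])) res

-- ===== PORT B =====
-- rest[r]: r ∈ range(dim_len) is always a valid index (rest has dim_len rows), so the
-- `.getD []` default of the total indexing primitive is never taken.
def deserialize_2d_matrix_unsafe_RR_alt (m : List Int) (dim_len : Int) : List (List Int) :=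
  if dim_len ≤ 0 then [m]
  else if m = [] then (PySem.List.pyRange 0 dim_len 1).map (fun _ => [])
  else
    let rest := deserialize_2d_matrix_unsafe_RR_alt (PySem.List.slice m (some dim_len) none) dim_len
    (PySem.List.pyRange 0 dim_len 1).map
      (fun r => PySem.List.slice m (some r) (some (r + 1)) ++ (PySem.List.pyGet? rest r).getD [])
termination_by m.length
decreasing_by
  rename_i h1 h2
  rw [PySem.List.slice_from _ (by omega : (0:Int) ≤ dim_len)]
  have hm : 0 < m.length := List.length_pos_iff.mpr h2
  have hd : 1 ≤ dim_len.toNat := by omega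
  simp only [List.length_drop]
  omega

-- ===== PRECONDITION & SPEC =====
def Spec_deserialize_2d_matrix_unsafe_RR (m : List Int) (dim_len : Int) (out : List (List Int)) : Prop := out = deserialize_2d_matrix_unsafe_RR_alt m dim_len
instance (m : List Int) (dim_len : Int) (out : List (List Int)) : Decidable (Spec_deserialize_2d_matrix_unsafe_RR m dim_len out) := by unfold Spec_deserialize_2d_matrix_unsafe_RR; infer_instance

-- ===== CLAIM (what is proved, stated in full; the proofs are below) =====
def Claim_equal_deserialize_2d_matrix_unsafe_RR : Prop := ∀ (m : List Int) (dim_len : Int), Dom_deserialize_2d_matrix_unsafe_RR m dim_len → Spec_deserialize_2d_matrix_unsafe_RR m dim_len (deserialize_2d_matrix_unsafe_RR m dim_len)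

-- ===== LEMMAS AND PROOFS =====

-- Reference: pickN d0 j i xs = the elements of xs landing in row j when the first element
-- of xs carries round-robin counter i (rows taken modulo d0).
def pickN (d0 j : Nat) : Nat → List Int → List Int
  | _, [] => []
  | i, x :: xs => if i % d0 = j then x :: pickN d0 j (i+1) xs else pickN d0 j (i+1) xs

def rrRows (d0 : Nat) (m : List Int) : List (List Int) :=
  (List.range d0).map (fun j => pickN d0 j 0 m)

theorem pv_mod_toNat (i d0 : Nat) (hd : 0 < d0) :
    (PySem.Int.mod (i : Int) (d0 : Int)).toNat = i % d0 := by
  unfold PySem.Int.mod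
  rw [Int.fmod_eq_emod, if_pos (Or.inl (by positivity))]
  omega

theorem pv_map_pyRange {α : Type} (d : Int) (hd : 0 < d) (f : Int → α) :
    (PySem.List.pyRange 0 d 1).map f = (List.range d.toNat).map (fun k : Nat => f (k : Int)) := by
  simp only [PySem.List.pyRange]
  rw [if_neg (by norm_num), if_pos (by norm_num), if_pos hd]
  have h1 : ((d - 0 + 1 - 1) / 1 : Int) = d := by omega
  rw [h1]
  simp [List.map_map, Function.comp]

theorem pv_len_pyRange (d : Int) (hd : 0 < d) : (PySem.List.pyRange 0 d 1).length = d.toNat := by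
  have h := congrArg List.length (pv_map_pyRange d hd (fun x => x))
  simpa using h

theorem pv_enum_fold (ls : List Int) : ∀ (i : Nat) (acc : List (Int × Int)),
    ls.foldl (fun (st : Int × List (Int × Int)) item => (st.1 + 1, st.2 ++ [(st.1, item)]))
      ((i : Int), acc)
    = (((i + ls.length : Nat) : Int), acc ++ (ls.zipIdx i).map (fun p => ((p.2 : Int), p.1))) := by
  induction ls with
  | nil => intro i acc; simp
  | cons x xs ih =>
      intro i acc
      simp only [List.foldl_cons, List.zipIdx_cons, List.map_cons]
      have : ((i : Int) + 1) = ((i + 1 : Nat) : Int) := by push_cast; ring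
      rw [this, ih (i+1) (acc ++ [((i : Int), x)])]
      simp only [Prod.mk.injEq]
      constructor
      · push_cast [List.length_cons]; ring
      · simp

theorem pv_enumerate_eq (ls : List Int) :
    enumerate_list ls = (ls.zipIdx 0).map (fun p => ((p.2 : Int), p.1)) := by
  unfold enumerate_list
  have h0 : ((0 : Int), ([] : List (Int × Int))) = (((0 : Nat) : Int), ([] : List (Int × Int))) := by
    norm_num
  rw [h0, pv_enum_fold ls 0 []]
  simp

theorem pv_res_init (l : List Int) : ∀ (acc : List (List Int)),
    l.foldl (fun acc _ => acc ++ [([] : List Int)]) acc = acc ++ List.replicate l.length [] := by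
  induction l with
  | nil => intro acc; simp
  | cons x xs ih =>
      intro acc
      simp only [List.foldl_cons, List.length_cons, ih (acc ++ [[]])]
      simp [List.replicate_succ]

theorem pv_fold_rows (d0 : Nat) (hd : 0 < d0) (ls : List Int) :
    ∀ (i : Nat) (res : List (List Int)),
    (((ls.zipIdx i).map (fun p => ((p.2 : Int), p.1))).foldl
        (fun res p => res.modify (PySem.Int.mod p.1 (d0 : Int)).toNat (fun row => row ++ [p.2]))
        res).length = res.length
    ∧ ∀ j : Nat, j < d0 →
      (((ls.zipIdx i).map (fun p => ((p.2 : Int), p.1))).foldl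
        (fun res p => res.modify (PySem.Int.mod p.1 (d0 : Int)).toNat (fun row => row ++ [p.2]))
        res)[j]? = (fun row => row ++ pickN d0 j i ls) <$> res[j]? := by
  induction ls with
  | nil =>
      intro i res
      refine ⟨rfl, fun j hj => ?_⟩
      simp only [List.zipIdx_nil, List.map_nil, List.foldl_nil, pickN]
      cases res[j]? <;> simp
  | cons x xs ih =>
      intro i res
      simp only [List.zipIdx_cons, List.map_cons, List.foldl_cons]
      rw [pv_mod_toNat i d0 hd]
      obtain ⟨hlen, hget⟩ := ih (i+1) (res.modify (i % d0) (fun row => row ++ [x]))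
      refine ⟨by rw [hlen, List.length_modify], fun j hj => ?_⟩
      rw [hget j hj, List.getElem?_modify]
      cases res[j]? with
      | none => simp
      | some row =>
          by_cases hij : i % d0 = j
          · simp [pickN, hij, List.append_assoc]
          · simp [pickN, hij]

theorem pv_A_char (m : List Int) (d : Int) (hd : 0 < d) :
    deserialize_2d_matrix_unsafe_RR m d = rrRows d.toNat m := by
  unfold deserialize_2d_matrix_unsafe_RR
  rw [if_neg (by omega)]
  have hres : (PySem.List.pyRange 0 d 1).foldl (fun acc _ => acc ++ [[]]) ([] : List (List Int))
      = List.replicate d.toNat ([] : List Int) := by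
    rw [pv_res_init]
    simp [pv_len_pyRange d hd]
  by_cases hm : m = []
  · subst hm
    simp only [List.length_nil, Int.natCast_zero, if_true, hres]
    unfold rrRows
    apply List.ext_getElem <;> simp [pickN]
  · rw [if_neg (by simpa using hm)]
    simp only [hres]
    rw [pv_enumerate_eq]
    have hd0 : 0 < d.toNat := by omega
    have hcast : ((d.toNat : Nat) : Int) = d := by omega
    obtain ⟨hlen, hget⟩ := pv_fold_rows d.toNat hd0 m 0 (List.replicate d.toNat [])
    rw [hcast] at hlen hget
    apply List.ext_getElem?
    intro j
    by_cases hj : j < d.toNat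
    · rw [hget j hj]
      unfold rrRows
      simp [hj]
    · have hL : (List.foldl
          (fun res p => res.modify (PySem.Int.mod p.1 d).toNat fun row => row ++ [p.2])
          (List.replicate d.toNat []) (List.map (fun p => (↑p.2, p.1)) (m.zipIdx 0))).length
          = d.toNat := by
        rw [hlen]; simp
      rw [List.getElem?_eq_none (by omega),
          List.getElem?_eq_none (by unfold rrRows; simp; omega)]

-- chunk lemmas about pickN
theorem pv_pick_per (d0 j : Nat) (xs : List Int) : ∀ i i' : Nat, i % d0 = i' % d0 →
    pickN d0 j i xs = pickN d0 j i' xs := by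
  induction xs with
  | nil => intro i i' _; rfl
  | cons x xs ih =>
      intro i i' h
      have h1 : (i + 1) % d0 = (i' + 1) % d0 := by
        rw [Nat.add_mod, h, ← Nat.add_mod]
      simp only [pickN, h, ih (i+1) (i'+1) h1]

theorem pv_pick_c1 (d0 j : Nat) (hjd : j < d0) : ∀ (xs : List Int) (i : Nat), i ≤ j →
    pickN d0 j i xs = xs[j - i]?.toList ++ pickN d0 j (j + 1) (xs.drop (j - i + 1)) := by
  intro xs
  induction xs with
  | nil => intro i _; simp [pickN]
  | cons x xs ih =>
      intro i _
      have him : i % d0 = i := Nat.mod_eq_of_lt (by omega)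
      by_cases hij : i = j
      · subst hij
        simp [pickN, him]
      · have hlt : i < j := by omega
        have h1 : j - i = (j - (i + 1)) + 1 := by omega
        simp only [pickN, him, if_neg hij]
        rw [ih (i+1) (by omega), h1]
        simp only [List.getElem?_cons_succ, List.drop_succ_cons]

theorem pv_pick_c2 (d0 j : Nat) (_hj : j < d0) : ∀ (xs : List Int) (i : Nat), j < i → i < d0 →
    pickN d0 j i xs = pickN d0 j 0 (xs.drop (d0 - i)) := by
  intro xs
  induction xs with
  | nil => intro i _ _; simp [pickN]
  | cons x xs ih =>
      intro i hji hid
      have him : i % d0 = i := Nat.mod_eq_of_lt hid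
      have hne : i ≠ j := by omega
      simp only [pickN, him, if_neg hne]
      by_cases h : i + 1 = d0
      · have hper : pickN d0 j (i+1) xs = pickN d0 j 0 xs := by
          apply pv_pick_per
          rw [h]; simp
        rw [hper]
        have : d0 - i = 1 := by omega
        rw [this]
        simp
      · rw [ih (i+1) (by omega) (by omega)]
        have h2 : d0 - i = (d0 - (i+1)) + 1 := by omega
        rw [h2]
        simp

theorem pv_pick_chunk (d0 j : Nat) (hj : j < d0) (xs : List Int) :
    pickN d0 j 0 xs = xs[j]?.toList ++ pickN d0 j 0 (xs.drop d0) := by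
  rw [pv_pick_c1 d0 j hj xs 0 (by omega)]
  simp only [Nat.sub_zero]
  by_cases h : j + 1 = d0
  · rw [h]
    congr 1
    apply pv_pick_per
    simp
  · rw [pv_pick_c2 d0 j hj _ (j+1) (by omega) (by omega)]
    rw [List.drop_drop]
    have h3 : j + 1 + (d0 - (j + 1)) = d0 := by omega
    rw [h3]

theorem pv_B_char : ∀ (n : Nat) (m : List Int), m.length ≤ n → ∀ d : Int, 0 < d →
    deserialize_2d_matrix_unsafe_RR_alt m d = rrRows d.toNat m := by
  intro n
  induction n with
  | zero =>
      intro m hm d hd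
      have hnil : m = [] := by
        cases m with
        | nil => rfl
        | cons x xs => simp at hm
      subst hnil
      unfold deserialize_2d_matrix_unsafe_RR_alt
      rw [if_neg (by omega), if_pos rfl, pv_map_pyRange d hd]
      unfold rrRows
      simp [pickN]
  | succ n ih =>
      intro m hm d hd
      by_cases hnil : m = []
      · subst hnil
        unfold deserialize_2d_matrix_unsafe_RR_alt
        rw [if_neg (by omega), if_pos rfl, pv_map_pyRange d hd]
        unfold rrRows
        simp [pickN]
      · have hd0 : 0 < d.toNat := by omega
        have hmlen : 0 < m.length := List.length_pos_iff.mpr hnil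
        rw [deserialize_2d_matrix_unsafe_RR_alt]
        rw [if_neg (by omega), if_neg hnil]
        have hslice : PySem.List.slice m (some d) none = m.drop d.toNat :=
          PySem.List.slice_from _ (by omega)
        have hrest : deserialize_2d_matrix_unsafe_RR_alt (PySem.List.slice m (some d) none) d
            = rrRows d.toNat (m.drop d.toNat) := by
          rw [hslice]
          exact ih _ (by simp [List.length_drop]; omega) d hd
        rw [hrest, pv_map_pyRange d hd]
        unfold rrRows
        apply List.map_congr_left
        intro k hk
        have hkd : k < d.toNat := List.mem_range.mp hk
        have hc : ((k : Int) + 1) = ((k : Nat) : Int) + ((1 : Nat) : Int) := by simp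
        rw [hc, PySem.List.slice_natCast_add m k 1, List.take_one, List.head?_drop]
        rw [PySem.List.pyGet?_natCast]
        have hrk : ((List.range d.toNat).map (fun j => pickN d.toNat j 0 (m.drop d.toNat)))[k]?
            = some (pickN d.toNat k 0 (m.drop d.toNat)) := by
          simp [hkd]
        rw [hrk]
        simp only [Option.getD_some]
        exact (pv_pick_chunk d.toNat k hkd m).symm

-- ===== VERDICT (by name: the statement is the Claim_ definition above) =====
theorem deserialize_2d_matrix_unsafe_RR_spec : Claim_equal_deserialize_2d_matrix_unsafe_RR := by
  intro m d _
  unfold Spec_deserialize_2d_matrix_unsafe_RR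
  by_cases hd : d ≤ 0
  · unfold deserialize_2d_matrix_unsafe_RR deserialize_2d_matrix_unsafe_RR_alt
    rw [if_pos hd, if_pos hd]
  · rw [pv_A_char m d (by omega), pv_B_char m.length m le_rfl d (by omega)]
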